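-- pv_equiv track=rewrite | github.com/Kawser-nerd/CLCDSA | Source Codes/AtCoder/abc121/D/4933141.py | cal_xor
-- ===== SOURCE A (Python) =====
-- def cal_xor(X):
--     X = X+1
--     xor_sum = 0
--     digit = 1
--     while digit < X:
--         digit *= 2
--         bit_count = (X // digit) * (digit // 2)
--         bit_count += max(0, (X % digit) - (digit // 2))
--
--         if bit_count % 2 == 1:
--             xor_sum += digit // 2
--
--     return xor_sum
-- ===== SOURCE B (Python) =====
-- def cal_xor(X):
--     # closed form for XOR of 0..X (empty range for X < 0)
--     if X < 0:
--         return 0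
--     r = X % 4
--     if r == 0:
--         return X
--     elif r == 1:
--         return 1
--     elif r == 2:
--         return X + 1
--     else:
--         return 0
-- ===== Notes on version B (the rewrite author's own statement) =====
-- stated objective: simpler
-- what changed: Replaced A's per-bit counting loop (count set bits in 0..X at each position, add the place value when the count is odd) with the classic O(1) closed form for XOR of 0..X by X mod 4, with a guard returning 0 for the empty range X < 0.
import Mathlib
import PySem

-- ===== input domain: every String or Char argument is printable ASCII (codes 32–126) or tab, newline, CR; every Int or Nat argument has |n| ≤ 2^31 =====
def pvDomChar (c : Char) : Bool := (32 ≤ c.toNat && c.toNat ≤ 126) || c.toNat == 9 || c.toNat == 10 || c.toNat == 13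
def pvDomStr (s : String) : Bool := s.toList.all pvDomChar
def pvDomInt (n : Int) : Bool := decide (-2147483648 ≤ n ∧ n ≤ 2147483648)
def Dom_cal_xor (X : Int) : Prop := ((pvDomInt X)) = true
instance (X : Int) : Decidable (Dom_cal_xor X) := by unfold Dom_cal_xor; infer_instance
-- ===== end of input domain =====

-- B replaces A's per-bit-position counting loop by the closed form for XOR of 0..X based on X mod 4 (with 0 for the empty range X < 0): simpler.

-- ===== PORT A =====
-- A's while loop, with fuel (X+1).toNat: digit doubles each pass starting from 1,
-- so the guard `digit < X+1` fails within that many passes (fuel only makes the loop total).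
def calXorLoop : Nat → Int → Int → Int → Int
  | 0, _, xorSum, _ => xorSum
  | fuel+1, x, xorSum, digit =>
    if digit < x then
      let digit' := digit * 2
      let bitCount := PySem.Int.floordiv x digit' * PySem.Int.floordiv digit' 2
        + max 0 (PySem.Int.mod x digit' - PySem.Int.floordiv digit' 2)
      calXorLoop fuel x
        (if PySem.Int.mod bitCount 2 = 1 then xorSum + PySem.Int.floordiv digit' 2 else xorSum)
        digit'
    else xorSum

def cal_xor (X : Int) : Int := calXorLoop (X + 1).toNat (X + 1) 0 1

-- ===== PORT B =====
def cal_xor_alt (X : Int) : Int :=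
  if X < 0 then 0
  else
    let r := PySem.Int.mod X 4
    if r = 0 then X
    else if r = 1 then 1
    else if r = 2 then X + 1
    else 0

-- ===== PRECONDITION & SPEC =====
def Spec_cal_xor (X : Int) (out : Int) : Prop := out = cal_xor_alt X
instance (X : Int) (out : Int) : Decidable (Spec_cal_xor X out) := by unfold Spec_cal_xor; infer_instance

-- ===== CLAIM (what is proved, stated in full; the proofs are below) =====
def Claim_equal_cal_xor : Prop := ∀ (X : Int), Dom_cal_xor X → Spec_cal_xor X (cal_xor X)

-- ===== LEMMAS AND PROOFS =====

-- XOR of 0, 1, …, n-1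
def xorUpTo : Nat → Nat
  | 0 => 0
  | n+1 => xorUpTo n ^^^ n

-- A's bit count at position j, over Nat
def bitCnt (n j : Nat) : Nat := n / 2^(j+1) * 2^j + (n % 2^(j+1) - 2^j)

lemma even_xor_one (a : Nat) (h : a % 2 = 0) : a ^^^ 1 = a + 1 := by
  apply Nat.eq_of_testBit_eq
  intro i
  cases i with
  | zero =>
      rw [Nat.testBit_xor]
      simp only [Nat.testBit_eq_decide_div_mod_eq, pow_zero, Nat.div_one]
      have : (a+1) % 2 = 1 := by omega
      simp [h, this]
  | succ i =>
      rw [Nat.testBit_xor]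
      have h1 : (a+1) / 2 = a / 2 := by omega
      have h2 : ∀ m : Nat, m / 2 ^ (i+1) = m / 2 / 2 ^ i := by
        intro m
        rw [Nat.div_div_eq_div_mul, pow_succ']
      have h3 : (1 : Nat).testBit (i+1) = false := by
        simp only [Nat.testBit_eq_decide_div_mod_eq]
        rw [Nat.div_eq_of_lt (Nat.one_lt_two_pow (by omega))]
        simp
      rw [h3]
      simp only [Bool.xor_false, Nat.testBit_eq_decide_div_mod_eq]
      rw [h2 a, h2 (a+1), h1]

lemma xorUpTo_mod4 (n : Nat) :
    xorUpTo n = if n % 4 = 0 then 0 else if n % 4 = 1 then n - 1 else if n % 4 = 2 then 1 else n := by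
  induction n with
  | zero => simp [xorUpTo]
  | succ n ih =>
      rw [xorUpTo, ih]
      have h4 : n % 4 = 0 ∨ n % 4 = 1 ∨ n % 4 = 2 ∨ n % 4 = 3 := by omega
      rcases h4 with h | h | h | h
      · have hs : (n+1) % 4 = 1 := by omega
        simp [h, hs]
      · have hs : (n+1) % 4 = 2 := by omega
        have he : (n-1) % 2 = 0 := by omega
        have hx : (n-1) ^^^ 1 = n := by
          rw [even_xor_one _ he]; omega
        have : (n-1) ^^^ n = 1 :=
          calc (n-1) ^^^ n = (n-1) ^^^ ((n-1) ^^^ 1) := by rw [hx]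
            _ = 1 := by rw [← Nat.xor_assoc, Nat.xor_self, Nat.zero_xor]
        simp [h, hs, this]
      · have hs : (n+1) % 4 = 3 := by omega
        have he : n % 2 = 0 := by omega
        have : (1 : Nat) ^^^ n = n + 1 := by
          rw [Nat.xor_comm, even_xor_one _ he]
        simp [h, hs, this]
      · have hs : (n+1) % 4 = 0 := by omega
        simp [h, hs]

lemma testBit_le_mod (n j : Nat) : n.testBit j = decide (2^j ≤ n % 2^(j+1)) := by
  have key : n % 2^(j+1) / 2^j = n / 2^j % 2 := by
    rw [pow_succ]
    exact Nat.mod_mul_right_div_self n (2^j) 2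
  have hp : 0 < (2:Nat)^j := Nat.two_pow_pos j
  have hlt : n % 2^(j+1) < 2^(j+1) := Nat.mod_lt _ (Nat.two_pow_pos _)
  have hd : (2:Nat)^(j+1) = 2^j * 2 := pow_succ 2 j
  rw [Nat.testBit_eq_decide_div_mod_eq, ← key]
  rcases Nat.lt_or_ge (n % 2^(j+1)) (2^j) with hc | hc
  · have : n % 2^(j+1) / 2^j = 0 := Nat.div_eq_of_lt hc
    simp [this]; omega
  · have h1 : 1 ≤ n % 2^(j+1) / 2^j := (Nat.le_div_iff_mul_le hp).mpr (by omega)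
    have h2 : n % 2^(j+1) / 2^j < 2 := by
      rw [Nat.div_lt_iff_lt_mul hp]; omega
    have : n % 2^(j+1) / 2^j = 1 := by omega
    simp [this]; omega

lemma bitCnt_succ (n j : Nat) :
    bitCnt (n+1) j = bitCnt n j + (if n.testBit j then 1 else 0) := by
  have hp : 0 < (2:Nat)^j := Nat.two_pow_pos j
  have hd : (2:Nat)^(j+1) = 2^j * 2 := pow_succ 2 j
  have hdpos : 0 < (2:Nat)^(j+1) := Nat.two_pow_pos _
  set d := (2:Nat)^(j+1) with hdd
  set h := (2:Nat)^j with hh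
  set q := n / d with hq
  set r := n % d with hr
  have hnd : d * q + r = n := Nat.div_add_mod n d
  have hrb : r < d := Nat.mod_lt _ hdpos
  have htb : n.testBit j = decide (h ≤ r) := testBit_le_mod n j
  rcases Nat.lt_or_ge (r+1) d with hc | hc
  · -- (n+1)/d = q, (n+1)%d = r+1
    have he : n + 1 = d * q + (r+1) := by omega
    have hq' : (n+1) / d = q := by
      rw [he, Nat.mul_add_div hdpos, Nat.div_eq_of_lt hc]; omega
    have hr' : (n+1) % d = r + 1 := by
      rw [he, Nat.mul_add_mod]; exact Nat.mod_eq_of_lt hc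
    unfold bitCnt
    rw [← hdd, ← hh, ← hq, ← hr, hq', hr', htb]
    split_ifs with hle <;> simp at * <;> omega
  · -- r + 1 = d
    have hrd : r + 1 = d := by omega
    have he : n + 1 = d * (q+1) := by rw [Nat.mul_succ]; omega
    have hq' : (n+1) / d = q + 1 := by rw [he, Nat.mul_div_cancel_left _ hdpos]
    have hr' : (n+1) % d = 0 := by rw [he, Nat.mul_mod_right]
    unfold bitCnt
    rw [← hdd, ← hh, ← hq, ← hr, hq', hr', htb]
    have hle : h ≤ r := by omega
    have : (q+1) * h = q * h + h := by ring
    simp [hle, this]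
    omega

lemma testBit_xorUpTo (n j : Nat) :
    (xorUpTo n).testBit j = decide (bitCnt n j % 2 = 1) := by
  induction n with
  | zero =>
      simp [xorUpTo, bitCnt, Nat.zero_testBit]
  | succ n ih =>
      rw [xorUpTo, Nat.testBit_xor, ih, bitCnt_succ]
      cases hb : n.testBit j
      · simp
      · have hpar : bitCnt n j % 2 = 0 ∨ bitCnt n j % 2 = 1 := by omega
        rcases hpar with h | h <;> simp [h] <;> omega

lemma mod_pow_succ_testBit (m j : Nat) :
    m % 2^(j+1) = m % 2^j + (if m.testBit j then 2^j else 0) := by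
  have := Nat.mod_pow_succ (x := m) (b := 2) (k := j)
  rw [Nat.testBit_eq_decide_div_mod_eq]
  have h2 : m / 2^j % 2 = 0 ∨ m / 2^j % 2 = 1 := by omega
  rcases h2 with h | h <;> simp [h] at this ⊢ <;> omega

lemma xorUpTo_lt (n j : Nat) (h : n ≤ 2^j) : xorUpTo n < 2^j := by
  induction n with
  | zero => rw [xorUpTo]; exact Nat.two_pow_pos j
  | succ n ih =>
      rw [xorUpTo]
      exact Nat.xor_lt_two_pow (ih (by omega)) (by omega)

lemma calXorLoop_eq (fuel : Nat) : ∀ (j n : Nat), n ≤ 2^(j + fuel) →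
    calXorLoop fuel (n : Int) ((xorUpTo n % 2^j : Nat) : Int) ((2^j : Nat) : Int)
      = ((xorUpTo n : Nat) : Int) := by
  induction fuel with
  | zero =>
      intro j n hle
      simp only [calXorLoop]
      rw [Nat.mod_eq_of_lt (xorUpTo_lt n j (by simpa using hle))]
  | succ fuel ih =>
      intro j n hle
      simp only [calXorLoop]
      by_cases hlt : (2^j : Nat) < n
      · rw [if_pos (by exact_mod_cast hlt)]
        have hdig : ((2^j : Nat) : Int) * 2 = ((2^(j+1) : Nat) : Int) := by
          push_cast [pow_succ]; ring
        have hhalf : PySem.Int.floordiv ((2^(j+1) : Nat) : Int) 2 = ((2^j : Nat) : Int) := by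
          have h2c : (2 : Int) = ((2 : Nat) : Int) := by norm_num
          rw [h2c, PySem.Int.floordiv_natCast, pow_succ, Nat.mul_div_cancel _ (by norm_num)]
        have hfd : PySem.Int.floordiv (n : Int) ((2^(j+1) : Nat) : Int)
            = ((n / 2^(j+1) : Nat) : Int) := PySem.Int.floordiv_natCast n (2^(j+1))
        have hmd : PySem.Int.mod (n : Int) ((2^(j+1) : Nat) : Int)
            = ((n % 2^(j+1) : Nat) : Int) := PySem.Int.mod_natCast n (2^(j+1))
        have hmax : max 0 (((n % 2^(j+1) : Nat) : Int) - ((2^j : Nat) : Int))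
            = ((n % 2^(j+1) - 2^j : Nat) : Int) := by
          rcases Nat.le_total (2^j) (n % 2^(j+1)) with hc | hc
          · rw [Nat.cast_sub hc, max_eq_right (by omega)]
          · rw [Nat.sub_eq_zero_of_le hc, max_eq_left (by omega)]
            simp
        have hbc : ((n / 2^(j+1) : Nat) : Int) * ((2^j : Nat) : Int)
            + ((n % 2^(j+1) - 2^j : Nat) : Int) = ((bitCnt n j : Nat) : Int) := by
          unfold bitCnt
          rw [Nat.cast_add, Nat.cast_mul]
        rw [hdig, hhalf, hfd, hmd, hmax, hbc]
        have hcond : (PySem.Int.mod ((bitCnt n j : Nat) : Int) 2 = 1) ↔ (bitCnt n j % 2 = 1) := by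
          have h2c : (2 : Int) = ((2 : Nat) : Int) := by norm_num
          rw [h2c, PySem.Int.mod_natCast]
          exact_mod_cast Iff.rfl
        have hsum : (if PySem.Int.mod ((bitCnt n j : Nat) : Int) 2 = 1
              then ((xorUpTo n % 2^j : Nat) : Int) + ((2^j : Nat) : Int)
              else ((xorUpTo n % 2^j : Nat) : Int))
            = ((xorUpTo n % 2^(j+1) : Nat) : Int) := by
          rw [mod_pow_succ_testBit (xorUpTo n) j, testBit_xorUpTo n j]
          by_cases hp : bitCnt n j % 2 = 1
          · rw [if_pos (hcond.mpr hp)]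
            simp only [hp, decide_true, if_true]
            push_cast; ring
          · rw [if_neg (fun hc => hp (hcond.mp hc))]
            simp [hp]
        rw [hsum]
        exact ih (j+1) n (by rw [show j + 1 + fuel = j + (fuel + 1) from by omega]; exact hle)
      · rw [if_neg (by exact_mod_cast hlt)]
        have hle' : n ≤ 2^j := by omega
        rw [Nat.mod_eq_of_lt (xorUpTo_lt n j hle')]

-- ===== VERDICT (by name: the statement is the Claim_ definition above) =====
theorem cal_xor_spec : Claim_equal_cal_xor := by
  intro X _
  unfold Spec_cal_xor cal_xor cal_xor_alt
  by_cases hX : X < 0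
  · have h0 : (X + 1).toNat = 0 := by omega
    rw [h0]
    simp [calXorLoop, hX]
  · have hm : X = ((X.toNat : Nat) : Int) := by omega
    set m := X.toNat with hmm
    have hX1 : X + 1 = ((m + 1 : Nat) : Int) := by omega
    have hloop : calXorLoop (X + 1).toNat (X + 1) 0 1 = ((xorUpTo (m+1) : Nat) : Int) := by
      have ht : (X + 1).toNat = m + 1 := by omega
      rw [ht, hX1]
      have := calXorLoop_eq (m+1) 0 (m+1) (by simp; exact Nat.le_of_lt Nat.lt_two_pow_self)
      simpa using this
    rw [hloop, if_neg hX]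
    have hmod : PySem.Int.mod X 4 = ((m % 4 : Nat) : Int) := by
      rw [hm]
      have : (4 : Int) = ((4 : Nat) : Int) := by norm_num
      rw [this, PySem.Int.mod_natCast]
    rw [xorUpTo_mod4 (m+1), hmod]
    have h4 : m % 4 = 0 ∨ m % 4 = 1 ∨ m % 4 = 2 ∨ m % 4 = 3 := by omega
    rcases h4 with h | h | h | h
    · have hs : (m+1) % 4 = 1 := by omega
      simp [h, hs]; omega
    · have hs : (m+1) % 4 = 2 := by omega
      simp [h, hs]
    · have hs : (m+1) % 4 = 3 := by omega
      simp [h, hs]; omega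
    · have hs : (m+1) % 4 = 0 := by omega
      simp [h, hs]
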